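-- pv_equiv track=rewrite | github.com/Concyclics/MemForest | src/build/tree.py | _bucket_indices
-- ===== SOURCE A (Python) =====
-- def _bucket_indices(n: int, k: int) -> list[list[int]]:
--     """Partition n items into groups of at most k indices, avoiding size-1 last buckets.
--
--     When n % k == 1 the naive approach produces a single-child last bucket which
--     creates a fanout=1 internal node.  Instead we shorten the second-to-last
--     group by 1 so both of the final two groups have at least 2 elements.
--     """
--     if n == 0:
--         return []
--     effective_k = max(2, k)
--     buckets: list[list[int]] = []
--     i = 0
--     remaining = n
--     while remaining > 0:
--         # If taking a full bucket would leave exactly 1 left, take one less now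
--         # so the remaining 2 items fill the next (final) bucket of size 2.
--         take = effective_k if remaining - effective_k != 1 else effective_k - 1
--         take = min(take, remaining)
--         buckets.append(list(range(i, i + take)))
--         i += take
--         remaining -= take
--     return buckets
-- ===== SOURCE B (Python) =====
-- def _bucket_indices(n: int, k: int) -> list[list[int]]:
--     """Same partition as A, computed arithmetically: closed-form bucket sizes then one emit pass."""
--     if n <= 0:
--         return []
--     ek = max(2, k)
--     full, rem = divmod(n, ek)
--     sizes = [ek] * full + ([rem] if rem else [])
--     if rem == 1 and full >= 1:
--         sizes = [ek] * (full - 1) + [ek - 1, 2]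
--     out = []
--     off = 0
--     for s in sizes:
--         out.append(list(range(off, off + s)))
--         off += s
--     return out
-- ===== Notes on version B (the rewrite author's own statement) =====
-- stated objective: simpler
-- what changed: Replaces A's subtract-and-conditionally-shrink while-loop (which decides each bucket's size on the fly) with a closed-form divmod computation of the full list of bucket sizes followed by a single emit pass with a running offset.
import Mathlib
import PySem

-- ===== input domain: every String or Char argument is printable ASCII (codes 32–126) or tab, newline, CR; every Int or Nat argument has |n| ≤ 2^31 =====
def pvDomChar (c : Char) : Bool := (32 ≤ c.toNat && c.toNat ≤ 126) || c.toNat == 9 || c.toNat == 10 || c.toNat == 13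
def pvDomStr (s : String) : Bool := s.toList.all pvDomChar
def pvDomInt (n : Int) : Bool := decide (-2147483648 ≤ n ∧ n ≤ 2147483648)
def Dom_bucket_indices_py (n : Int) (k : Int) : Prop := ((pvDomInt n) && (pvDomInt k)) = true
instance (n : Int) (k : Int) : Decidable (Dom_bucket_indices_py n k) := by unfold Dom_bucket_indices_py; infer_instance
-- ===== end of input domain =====

-- B replaces A's subtract-and-conditionally-shrink while-loop by a closed-form list of
-- bucket sizes (divmod) followed by a single emit pass (objective: simpler).

-- ===== PORT A =====
-- the while-loop of A; ek = max(2, k), so 2 ≤ ek holds at every call site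
def bucketLoopA (ek : Int) (hk : 2 ≤ ek) (i remaining : Int) (buckets : List (List Int)) :
    List (List Int) :=
  if _hr : 0 < remaining then
    let take0 := if remaining - ek ≠ 1 then ek else ek - 1
    let take := min take0 remaining
    bucketLoopA ek hk (i + take) (remaining - take)
      (buckets ++ [PySem.List.pyRange i (i + take) 1])
  else buckets
termination_by remaining.toNat
decreasing_by
  split <;> omega

def bucket_indices_py (n : Int) (k : Int) : List (List Int) :=
  if n = 0 then [] else bucketLoopA (max 2 k) (le_max_left 2 k) 0 n []

-- ===== PORT B =====
-- closed-form bucket sizes: full buckets of ek, a remainder bucket, with the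
-- rem == 1 case replaced by a trailing (ek-1, 2) pair
def pvSizesB (ek : Int) (n : Int) : List Int :=
  let full := PySem.Int.floordiv n ek
  let rem := PySem.Int.mod n ek
  if rem = 1 ∧ 1 ≤ full then
    List.replicate (full - 1).toNat ek ++ [ek - 1, 2]
  else
    List.replicate full.toNat ek ++ (if rem ≠ 0 then [rem] else [])

-- the emit pass: walk the sizes once with a running offset
def pvEmit (off : Int) : List Int → List (List Int)
  | [] => []
  | s :: rest => PySem.List.pyRange off (off + s) 1 :: pvEmit (off + s) rest

def bucket_indices_py_alt (n : Int) (k : Int) : List (List Int) :=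
  if n ≤ 0 then [] else pvEmit 0 (pvSizesB (max 2 k) n)

-- ===== PRECONDITION & SPEC =====
def Spec_bucket_indices_py (n : Int) (k : Int) (out : List (List Int)) : Prop := out = bucket_indices_py_alt n k
instance (n : Int) (k : Int) (out : List (List Int)) : Decidable (Spec_bucket_indices_py n k out) := by unfold Spec_bucket_indices_py; infer_instance

-- ===== CLAIM (what is proved, stated in full; the proofs are below) =====
def Claim_equal_bucket_indices_py : Prop := ∀ (n : Int) (k : Int), Dom_bucket_indices_py n k → Spec_bucket_indices_py n k (bucket_indices_py n k)

-- ===== LEMMAS AND PROOFS =====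

lemma pvSizes_small (ek r : Int) (h0 : 0 < r) (h1 : r < ek) : pvSizesB ek r = [r] := by
  have hf : PySem.Int.floordiv r ek = 0 := by
    rw [PySem.Int.floordiv_eq_iff_of_pos (by omega)]; omega
  have hm : PySem.Int.mod r ek = r := by
    have := PySem.Int.floordiv_mul_add_mod r ek
    rw [hf] at this; omega
  simp only [pvSizesB, hf, hm]
  split
  · omega
  · simp; omega

lemma pvSizes_exact (ek : Int) (hk : 2 ≤ ek) : pvSizesB ek ek = [ek] := by
  have hf : PySem.Int.floordiv ek ek = 1 := by
    rw [PySem.Int.floordiv_eq_iff_of_pos (by omega)]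
    constructor <;> nlinarith
  have hm : PySem.Int.mod ek ek = 0 := by
    have := PySem.Int.floordiv_mul_add_mod ek ek
    rw [hf] at this; omega
  simp [pvSizesB, hf, hm]

lemma pvSizes_special (ek : Int) (hk : 2 ≤ ek) : pvSizesB ek (ek + 1) = [ek - 1, 2] := by
  have hf : PySem.Int.floordiv (ek + 1) ek = 1 := by
    rw [PySem.Int.floordiv_eq_iff_of_pos (by omega)]
    constructor <;> nlinarith
  have hm : PySem.Int.mod (ek + 1) ek = 1 := by
    have := PySem.Int.floordiv_mul_add_mod (ek + 1) ek
    rw [hf] at this; omega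
  simp [pvSizesB, hf, hm]

lemma pvSizes_step (ek r : Int) (hk : 2 ≤ ek) (hr : ek + 1 < r) :
    pvSizesB ek r = ek :: pvSizesB ek (r - ek) := by
  set q := PySem.Int.floordiv (r - ek) ek with hq
  set m := PySem.Int.mod (r - ek) ek with hmdef
  have hqm : q * ek + m = r - ek := PySem.Int.floordiv_mul_add_mod (r - ek) ek
  have hm0 : 0 ≤ m := PySem.Int.mod_nonneg _ (by omega)
  have hmlt : m < ek := PySem.Int.mod_lt _ (by omega)
  have hq0 : 0 ≤ q := by nlinarith
  have hexp : (q + 1) * ek = q * ek + ek := by ring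
  have hexp2 : (q + 2) * ek = q * ek + ek + ek := by ring
  have hf : PySem.Int.floordiv r ek = q + 1 := by
    rw [PySem.Int.floordiv_eq_iff_of_pos (by omega)]
    constructor <;> linarith
  have hm : PySem.Int.mod r ek = m := by
    have := PySem.Int.floordiv_mul_add_mod r ek
    rw [hf] at this; linarith
  simp only [pvSizesB, hf, hm, ← hq, ← hmdef]
  by_cases h1 : m = 1
  · -- remainder 1: q ≥ 1, else r = ek + 1
    have hq1 : 1 ≤ q := by
      rcases lt_or_ge q 1 with h | h
      · have : q = 0 := by omega
        rw [this] at hqm; omega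
      · exact h
    have ht : (q + 1 - 1).toNat = (q - 1).toNat + 1 := by omega
    rw [if_pos ⟨h1, by omega⟩, if_pos ⟨h1, hq1⟩]
    rw [show q + 1 - 1 = (q - 1) + 1 by ring]
    rw [show ((q - 1) + 1).toNat = (q - 1).toNat + 1 by omega]
    simp [List.replicate_succ]
  · have hiff : ¬ (m = 1 ∧ 1 ≤ q + 1) := by tauto
    have hiff2 : ¬ (m = 1 ∧ 1 ≤ q) := by tauto
    rw [if_neg hiff, if_neg hiff2]
    rw [show (q + 1).toNat = q.toNat + 1 by omega]
    simp [List.replicate_succ]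

lemma loopA_eq (ek : Int) (hk : 2 ≤ ek) (i r : Int) (hr : 0 < r) (acc : List (List Int)) :
    bucketLoopA ek hk i r acc = acc ++ pvEmit i (pvSizesB ek r) := by
  rcases lt_trichotomy r (ek + 1) with hlt | heq | hgt
  · -- r ≤ ek : single final bucket of size r
    have htake : (if r - ek ≠ 1 then ek else ek - 1) = ek := if_pos (by omega)
    have hmin : min ek r = r := by omega
    rw [bucketLoopA.eq_def]
    simp only [dif_pos hr, htake, hmin]
    rw [bucketLoopA.eq_def, dif_neg (by omega)]
    have hs : pvSizesB ek r = [r] := by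
      rcases eq_or_lt_of_le (show r ≤ ek by omega) with he | hl
      · rw [he]; exact he ▸ pvSizes_exact ek hk
      · exact pvSizes_small ek r hr hl
    rw [hs]
    simp [pvEmit]
  · -- r = ek + 1 : two buckets of sizes ek - 1 and 2
    subst heq
    have htake : (if ek + 1 - ek ≠ 1 then ek else ek - 1) = ek - 1 := if_neg (by omega)
    have hmin : min (ek - 1) (ek + 1) = ek - 1 := by omega
    rw [bucketLoopA.eq_def]
    simp only [dif_pos hr, htake, hmin]
    have h2 : ek + 1 - (ek - 1) = 2 := by ring
    rw [h2]
    have htake2 : (if (2 : Int) - ek ≠ 1 then ek else ek - 1) = ek := if_pos (by omega)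
    have hmin2 : min ek (2 : Int) = 2 := by omega
    rw [bucketLoopA.eq_def]
    simp only [dif_pos (show (0 : Int) < 2 by omega), htake2, hmin2]
    rw [bucketLoopA.eq_def, dif_neg (by omega)]
    rw [pvSizes_special ek hk]
    simp [pvEmit]
  · -- r > ek + 1 : take a full bucket and recurse
    have htake : (if r - ek ≠ 1 then ek else ek - 1) = ek := if_pos (by omega)
    have hmin : min ek r = ek := by omega
    rw [bucketLoopA.eq_def]
    simp only [dif_pos hr, htake, hmin]
    rw [loopA_eq ek hk (i + ek) (r - ek) (by omega), pvSizes_step ek r hk hgt]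
    simp [pvEmit]
termination_by r.toNat
decreasing_by omega

-- ===== VERDICT (by name: the statement is the Claim_ definition above) =====
theorem bucket_indices_py_spec : Claim_equal_bucket_indices_py := by
  intro n k _
  unfold Spec_bucket_indices_py bucket_indices_py bucket_indices_py_alt
  rcases lt_trichotomy n 0 with h | h | h
  · rw [if_neg (by omega), if_pos (by omega), bucketLoopA.eq_def, dif_neg (by omega)]
  · rw [if_pos h, if_pos (by omega)]
  · rw [if_neg (by omega), if_neg (by omega),
      loopA_eq (max 2 k) (le_max_left 2 k) 0 n h, List.nil_append]
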